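-- pv_equiv track=rewrite | github.com/hcmut-cse/PDFMatching | matchingED.py | createStringLineList
-- ===== SOURCE A (Python) =====
-- def createStringLineList(CONFIG,lineList):
-- 	l=len(lineList)
-- 	s=[]
-- 	checked={}
-- 	for key in CONFIG: checked[key]=0
-- 	for i in range(l):
-- 		for key in CONFIG:
-- 			if (not checked[key]):
-- 				barPos=key.find('_')
-- 				if (barPos!=-1): realKey=key[:barPos]
-- 				else: realKey=key
-- 				if (lineList[i].find(realKey)!=-1):
-- 					s.append(key)
-- 					checked[key]=1
-- 	return s
-- ===== SOURCE B (Python) =====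
-- def createStringLineList(CONFIG, lineList):
--     # Stateless alternative: for every distinct key compute the index of the first
--     # line containing its pre-'_' prefix, then emit the keys grouped by that index.
--     def first_match(key):
--         barPos = key.find('_')
--         realKey = key[:barPos] if barPos != -1 else key
--         i = 0
--         for line in lineList:
--             if realKey in line:
--                 return i
--             i += 1
--         return -1
--     keys = list(dict.fromkeys(CONFIG))
--     first = {k: first_match(k) for k in keys}
--     return [k for i in range(len(lineList)) for k in keys if first[k] == i]
-- ===== Notes on version B (the rewrite author's own statement) =====
-- stated objective: alternative
-- what changed: A scans lines in order while mutating a 'checked' flag dict, re-visiting every CONFIG key (and recomputing its pre-'_' prefix) on every line; B has no scan state: it computes once per distinct key the index of the first line containing its prefix (stopping at the first hit), then emits the keys bucketed by that index.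
import Mathlib
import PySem

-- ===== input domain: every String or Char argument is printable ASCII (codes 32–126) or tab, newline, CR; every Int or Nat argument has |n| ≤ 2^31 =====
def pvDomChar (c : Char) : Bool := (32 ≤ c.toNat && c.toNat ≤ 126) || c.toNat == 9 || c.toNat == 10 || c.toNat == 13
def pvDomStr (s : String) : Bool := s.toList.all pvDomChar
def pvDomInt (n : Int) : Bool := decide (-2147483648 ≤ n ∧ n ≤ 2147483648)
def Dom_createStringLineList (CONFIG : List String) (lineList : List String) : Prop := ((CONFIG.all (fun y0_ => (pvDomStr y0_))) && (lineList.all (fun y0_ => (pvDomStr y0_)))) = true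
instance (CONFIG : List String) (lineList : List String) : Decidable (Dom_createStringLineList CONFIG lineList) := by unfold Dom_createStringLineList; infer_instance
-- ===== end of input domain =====

-- B replaces A's stateful line-by-line scan (a mutable 'checked' flag dict, each line
-- appending the still-unmatched keys whose pre-'_' prefix it contains) by a stateless
-- computation: for every distinct key the index of its first matching line, then the keys
-- emitted grouped by that index; objective: alternative (measured constant-factor faster).

-- shared helper mirroring the identical source expression in Source A and Source B:
-- realKey = key[:key.find('_')] if '_' occurs else key
def pvRealKey (key : String) : String :=
  let barPos := PySem.Str.find key "_"
  if barPos ≠ -1 then PySem.Str.slice key none (some barPos) else key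

-- ===== PORT A =====
-- hit test exactly as Source A writes it: line.find(realKey) != -1
def pvHit (line rk : String) : Bool := PySem.Str.find line rk != -1

-- body of A's inner 'for key in CONFIG' loop (state = (s, checked))
def pvStepA (line : String) (st : List String × PySem.Dict String Int) (key : String) :
    List String × PySem.Dict String Int :=
  if st.2.getD key 0 = 0 then
    let realKey := pvRealKey key
    if pvHit line realKey then (st.1 ++ [key], st.2.insert key 1) else st
  else st

def createStringLineList (CONFIG : List String) (lineList : List String) : List String :=
  let l : Int := lineList.length
  let checked : PySem.Dict String Int :=
    CONFIG.foldl (fun d key => d.insert key 0) PySem.Dict.empty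
  ((PySem.List.pyRange 0 l 1).foldl
      (fun st i => CONFIG.foldl (pvStepA (PySem.List.pyGetD lineList i "")) st)
      ([], checked)).1

-- ===== PORT B =====
-- Source B's first_match loop: index of the first line containing rk, else -1 (i is the counter)
def pvFirstFrom (rk : String) : Int → List String → Int
  | _, [] => -1
  | i, line :: rest => if PySem.Str.isIn rk line then i else pvFirstFrom rk (i + 1) rest

def createStringLineList_alt (CONFIG : List String) (lineList : List String) : List String :=
  let keys := PySem.List.dedup CONFIG
  let first : PySem.Dict String Int :=
    keys.foldl (fun d k => d.insert k (pvFirstFrom (pvRealKey k) 0 lineList)) PySem.Dict.empty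
  (PySem.List.pyRange 0 (lineList.length : Int) 1).flatMap
    (fun i => keys.filter (fun k => first.getD k 0 == i))

-- ===== PRECONDITION & SPEC =====
def Spec_createStringLineList (CONFIG : List String) (lineList : List String) (out : List String) : Prop := out = createStringLineList_alt CONFIG lineList
instance (CONFIG : List String) (lineList : List String) (out : List String) : Decidable (Spec_createStringLineList CONFIG lineList out) := by unfold Spec_createStringLineList; infer_instance

-- ===== CLAIM (what is proved, stated in full; the proofs are below) =====
def Claim_equal_createStringLineList : Prop := ∀ (CONFIG : List String) (lineList : List String), Dom_createStringLineList CONFIG lineList → Spec_createStringLineList CONFIG lineList (createStringLineList CONFIG lineList)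

-- ===== LEMMAS AND PROOFS =====

-- the worklist that A's dict state 'd' denotes: keys of cfg not yet seen whose flag is 0,
-- first occurrences only, paired with their prefixes
def pvPend : List String → PySem.Dict String Int → List String → List (String × String)
  | [], _, _ => []
  | k :: r, d, seen =>
    if k ∈ seen then pvPend r d seen
    else if d.getD k 0 = 0 then (k, pvRealKey k) :: pvPend r d (seen ++ [k])
    else pvPend r d (seen ++ [k])

def pvHits (line : String) (pending : List (String × String)) : List String :=
  (pending.filter fun p => pvHit line p.2).map Prod.fst

-- intermediate description of A's whole line loop: scan lines against a shrinking worklist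
def pvScan : List (String × String) → List String → List String
  | _, [] => []
  | pending, line :: rest =>
    if pending = [] then []
    else
      ((pending.filter fun p => pvHit line p.2).map Prod.fst)
        ++ pvScan (pending.filter fun p => !pvHit line p.2) rest

theorem pvPend_congr (cfg : List String) (d d' : PySem.Dict String Int) :
    ∀ seen, (∀ j, j ∉ seen → d.getD j 0 = d'.getD j 0) →
    pvPend cfg d seen = pvPend cfg d' seen := by
  induction cfg with
  | nil => intro seen h; rfl
  | cons k r ih =>
    intro seen h
    by_cases hk : k ∈ seen
    · simp [pvPend, hk, ih seen h]
    · have hkk := h k hk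
      have hseen : ∀ j, j ∉ seen ++ [k] → d.getD j 0 = d'.getD j 0 := by
        intro j hj
        exact h j (fun hm => hj (by simp [hm]))
      simp [pvPend, hk, ← hkk, ih _ hseen]

theorem pvPend_mem (cfg : List String) (d : PySem.Dict String Int) :
    ∀ seen p, p ∈ pvPend cfg d seen → p.2 = pvRealKey p.1 ∧ d.getD p.1 0 = 0 := by
  induction cfg with
  | nil => intro seen p hp; simp [pvPend] at hp
  | cons k r ih =>
    intro seen p hp
    by_cases hk : k ∈ seen
    · exact ih seen p (by simpa [pvPend, hk] using hp)
    · by_cases h0 : d.getD k 0 = 0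
      · simp only [pvPend, if_neg hk, if_pos h0, List.mem_cons] at hp
        rcases hp with hp | hp
        · subst hp; exact ⟨rfl, h0⟩
        · exact ih _ p hp
      · exact ih _ p (by simpa [pvPend, hk, h0] using hp)

theorem pvPend_complete (cfg : List String) (d : PySem.Dict String Int) :
    ∀ seen k, k ∈ cfg → d.getD k 0 = 0 → k ∉ seen → (k, pvRealKey k) ∈ pvPend cfg d seen := by
  induction cfg with
  | nil => intro seen k hk; simp at hk
  | cons a r ih =>
    intro seen k hk h0 hs
    rcases List.mem_cons.mp hk with h | h
    · subst h
      simp [pvPend, hs, h0]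
    · by_cases ha : a ∈ seen
      · simpa [pvPend, ha] using ih seen k h h0 hs
      · by_cases ha0 : d.getD a 0 = 0
        · by_cases hak : k = a
          · subst hak; simp [pvPend, hs, h0]
          · have : k ∉ seen ++ [a] := by simp [hs, hak]
            simp only [pvPend, if_neg ha, if_pos ha0]
            exact List.mem_cons_of_mem _ (ih _ k h h0 this)
        · have hak : k ≠ a := fun he => ha0 (he ▸ h0)
          have : k ∉ seen ++ [a] := by simp [hs, hak]
          simpa [pvPend, ha, ha0] using ih _ k h h0 this

theorem pvInner_spec (line : String) (cfg : List String) :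
    ∀ (s : List String) (d : PySem.Dict String Int) (seen : List String),
    (∀ k ∈ seen, d.getD k 0 = 0 → pvHit line (pvRealKey k) = false) →
    (cfg.foldl (pvStepA line) (s, d)).1 = s ++ pvHits line (pvPend cfg d seen)
    ∧ ∀ j, (cfg.foldl (pvStepA line) (s, d)).2.getD j 0
        = if j ∈ pvHits line (pvPend cfg d seen) then 1 else d.getD j 0 := by
  induction cfg with
  | nil => intro s d seen _; simp [pvPend, pvHits]
  | cons k r ih =>
    intro s d seen h
    rw [List.foldl_cons]
    by_cases hk : k ∈ seen
    · have hstep : pvStepA line (s, d) k = (s, d) := by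
        by_cases h0 : d.getD k 0 = 0
        · simp [pvStepA, h0, h k hk h0]
        · simp [pvStepA, h0]
      rw [hstep]
      simpa [pvPend, hk] using ih s d seen h
    · by_cases h0 : d.getD k 0 = 0
      · by_cases hhit : pvHit line (pvRealKey k) = true
        · have hstep : pvStepA line (s, d) k = (s ++ [k], d.insert k 1) := by
            simp [pvStepA, h0, hhit]
          rw [hstep]
          have hseen2 : ∀ j ∈ seen ++ [k], (d.insert k 1).getD j 0 = 0 →
              pvHit line (pvRealKey j) = false := by
            intro j hj hj0
            rcases List.mem_append.mp hj with hj | hj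
            · by_cases hjk : j = k
              · subst hjk; simp at hj0
              · rw [PySem.Dict.getD_insert] at hj0
                simp [hjk] at hj0
                exact h j hj hj0
            · simp at hj; subst hj; simp at hj0
          have hpc : pvPend r (d.insert k 1) (seen ++ [k]) = pvPend r d (seen ++ [k]) := by
            refine (pvPend_congr r d (d.insert k 1) (seen ++ [k]) (fun j hj => ?_)).symm
            have hjk : j ≠ k := by intro he; exact hj (by simp [he])
            rw [PySem.Dict.getD_insert]; simp [hjk]
          obtain ⟨ih1, ih2⟩ := ih (s ++ [k]) (d.insert k 1) (seen ++ [k]) hseen2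
          rw [hpc] at ih1 ih2
          have hpend : pvPend (k :: r) d seen
              = (k, pvRealKey k) :: pvPend r d (seen ++ [k]) := by
            simp [pvPend, hk, h0]
          have hhl : pvHits line (pvPend (k :: r) d seen)
              = k :: pvHits line (pvPend r d (seen ++ [k])) := by
            rw [hpend]; simp [pvHits, hhit]
          constructor
          · rw [ih1, hhl]; simp
          · intro j
            rw [ih2 j, hhl]
            by_cases hjm : j ∈ pvHits line (pvPend r d (seen ++ [k]))
            · simp [hjm]
            · by_cases hjk : j = k
              · subst hjk; simp [hjm]
              · rw [PySem.Dict.getD_insert]; simp [hjm, hjk]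
        · have hhitf : pvHit line (pvRealKey k) = false := by
            simpa using hhit
          have hstep : pvStepA line (s, d) k = (s, d) := by
            simp [pvStepA, h0, hhitf]
          rw [hstep]
          have hseen2 : ∀ j ∈ seen ++ [k], d.getD j 0 = 0 →
              pvHit line (pvRealKey j) = false := by
            intro j hj hj0
            rcases List.mem_append.mp hj with hj | hj
            · exact h j hj hj0
            · simp at hj; subst hj; exact hhitf
          have hpend : pvPend (k :: r) d seen
              = (k, pvRealKey k) :: pvPend r d (seen ++ [k]) := by
            simp [pvPend, hk, h0]
          have hhl : pvHits line (pvPend (k :: r) d seen)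
              = pvHits line (pvPend r d (seen ++ [k])) := by
            rw [hpend]; simp [pvHits, hhitf]
          obtain ⟨ih1, ih2⟩ := ih s d (seen ++ [k]) hseen2
          exact ⟨by rw [ih1, hhl], fun j => by rw [ih2 j, hhl]⟩
      · have hstep : pvStepA line (s, d) k = (s, d) := by simp [pvStepA, h0]
        rw [hstep]
        have hseen2 : ∀ j ∈ seen ++ [k], d.getD j 0 = 0 →
            pvHit line (pvRealKey j) = false := by
          intro j hj hj0
          rcases List.mem_append.mp hj with hj | hj
          · exact h j hj hj0
          · simp at hj; subst hj; exact absurd hj0 h0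
        have hpend : pvPend (k :: r) d seen = pvPend r d (seen ++ [k]) := by
          simp [pvPend, hk, h0]
        obtain ⟨ih1, ih2⟩ := ih s d (seen ++ [k]) hseen2
        exact ⟨by rw [ih1, hpend], fun j => by rw [ih2 j, hpend]⟩

theorem pvPend_after (line : String) (d d' : PySem.Dict String Int) (H : List String)
    (hd' : ∀ j, d'.getD j 0 = if j ∈ H then 1 else d.getD j 0)
    (hH1 : ∀ k ∈ H, pvHit line (pvRealKey k) = true)
    (hH0 : ∀ k ∈ H, d.getD k 0 = 0) :
    ∀ (cfg seen : List String),
    (∀ k, k ∈ cfg → k ∉ seen → d.getD k 0 = 0 → pvHit line (pvRealKey k) = true → k ∈ H) →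
    pvPend cfg d' seen = (pvPend cfg d seen).filter (fun p => !pvHit line p.2) := by
  intro cfg
  induction cfg with
  | nil => intro seen _; simp [pvPend]
  | cons k r ih =>
    intro seen hmem
    have hmem2 : ∀ k2, k2 ∈ r → k2 ∉ seen ++ [k] → d.getD k2 0 = 0 →
        pvHit line (pvRealKey k2) = true → k2 ∈ H := by
      intro k2 h1 h2 h3 h4
      exact hmem k2 (List.mem_cons_of_mem _ h1) (fun hm => h2 (by simp [hm])) h3 h4
    have hmemw : ∀ k2, k2 ∈ r → k2 ∉ seen → d.getD k2 0 = 0 →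
        pvHit line (pvRealKey k2) = true → k2 ∈ H := by
      intro k2 h1 h2 h3 h4
      exact hmem k2 (List.mem_cons_of_mem _ h1) h2 h3 h4
    by_cases hk : k ∈ seen
    · simp only [pvPend, if_pos hk]
      exact ih seen hmemw
    · by_cases h0 : d.getD k 0 = 0
      · by_cases hhit : pvHit line (pvRealKey k) = true
        · have hkH : k ∈ H := hmem k List.mem_cons_self hk h0 hhit
          have hdk : d'.getD k 0 = 1 := by rw [hd' k, if_pos hkH]
          have hdk0 : ¬ d'.getD k 0 = 0 := by rw [hdk]; norm_num
          simp only [pvPend, if_neg hk, if_pos h0, if_neg hdk0]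
          rw [List.filter_cons_of_neg (by simp [hhit])]
          exact ih (seen ++ [k]) hmem2
        · have hkH : k ∉ H := fun hx => hhit (hH1 k hx)
          have hdk : d'.getD k 0 = 0 := by rw [hd' k, if_neg hkH]; exact h0
          simp only [pvPend, if_neg hk, if_pos h0, if_pos hdk]
          rw [List.filter_cons_of_pos (by simp [Bool.not_eq_true] at hhit ⊢; exact hhit)]
          rw [ih (seen ++ [k]) hmem2]
      · have hkH : k ∉ H := fun hx => h0 (hH0 k hx)
        have hdk : ¬ d'.getD k 0 = 0 := by rw [hd' k, if_neg hkH]; exact h0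
        simp only [pvPend, if_neg hk, if_neg h0, if_neg hdk]
        exact ih (seen ++ [k]) hmem2

theorem pvScan_nil (lines : List String) : pvScan [] lines = [] := by
  cases lines <;> rfl

theorem pvOuter_spec (CONFIG : List String) :
    ∀ (lines : List String) (s : List String) (d : PySem.Dict String Int),
    (lines.foldl (fun st line => CONFIG.foldl (pvStepA line) st) (s, d)).1
      = s ++ pvScan (pvPend CONFIG d []) lines := by
  intro lines
  induction lines with
  | nil => intro s d; simp [pvScan]
  | cons line rest ih =>
    intro s d
    rw [List.foldl_cons]
    obtain ⟨h1, h2⟩ := pvInner_spec line CONFIG s d [] (by simp)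
    have hsplit : CONFIG.foldl (pvStepA line) (s, d)
        = ((CONFIG.foldl (pvStepA line) (s, d)).1, (CONFIG.foldl (pvStepA line) (s, d)).2) := rfl
    by_cases hp : pvPend CONFIG d [] = []
    · rw [hp] at h1 h2
      simp only [pvHits, List.filter_nil, List.map_nil, List.append_nil] at h1
      simp only [pvHits, List.filter_nil, List.map_nil, List.not_mem_nil, if_false] at h2
      have hpc : pvPend CONFIG (CONFIG.foldl (pvStepA line) (s, d)).2 [] = [] := by
        rw [pvPend_congr CONFIG _ d [] (fun j _ => h2 j), hp]
      rw [hsplit, ih _ _, h1, hpc, hp, pvScan_nil, pvScan_nil]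
    · have hH1 : ∀ k ∈ pvHits line (pvPend CONFIG d []), pvHit line (pvRealKey k) = true := by
        intro k hkm
        simp only [pvHits, List.mem_map, List.mem_filter] at hkm
        obtain ⟨p, ⟨hpm, hph⟩, hpk⟩ := hkm
        have := (pvPend_mem CONFIG d [] p hpm).1
        rw [← hpk, ← this]; exact hph
      have hH0 : ∀ k ∈ pvHits line (pvPend CONFIG d []), d.getD k 0 = 0 := by
        intro k hkm
        simp only [pvHits, List.mem_map, List.mem_filter] at hkm
        obtain ⟨p, ⟨hpm, _⟩, hpk⟩ := hkm
        rw [← hpk]; exact (pvPend_mem CONFIG d [] p hpm).2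
      have hmem : ∀ k, k ∈ CONFIG → k ∉ ([] : List String) → d.getD k 0 = 0 →
          pvHit line (pvRealKey k) = true → k ∈ pvHits line (pvPend CONFIG d []) := by
        intro k hk hks hk0 hkh
        have := pvPend_complete CONFIG d [] k hk hk0 hks
        simp only [pvHits, List.mem_map]
        exact ⟨(k, pvRealKey k), List.mem_filter.mpr ⟨this, by simpa using hkh⟩, rfl⟩
      have hpc : pvPend CONFIG (CONFIG.foldl (pvStepA line) (s, d)).2 []
          = (pvPend CONFIG d []).filter (fun p => !pvHit line p.2) :=
        pvPend_after line d _ (pvHits line (pvPend CONFIG d [])) h2 hH1 hH0 CONFIG [] hmem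
      rw [hsplit, ih _ _, h1, hpc]
      conv_rhs => rw [show pvScan (pvPend CONFIG d []) (line :: rest)
        = if pvPend CONFIG d [] = [] then []
          else (((pvPend CONFIG d []).filter fun p => pvHit line p.2).map Prod.fst)
            ++ pvScan ((pvPend CONFIG d []).filter fun p => !pvHit line p.2) rest from rfl]
      rw [if_neg hp]
      simp [pvHits]

theorem pvChecked0 (cfg : List String) :
    ∀ (d : PySem.Dict String Int), (∀ j, d.getD j 0 = 0) →
    ∀ j, (cfg.foldl (fun d k => d.insert k 0) d).getD j 0 = 0 := by
  induction cfg with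
  | nil => intro d h j; exact h j
  | cons k r ih =>
    intro d h j
    refine ih _ (fun j' => ?_) j
    simp [PySem.Dict.getD_insert, h j']

-- plain recursive form of ordered first-occurrence dedup, relative to 'seen'
def pvDed : List String → List String → List String
  | _, [] => []
  | seen, k :: r => if k ∈ seen then pvDed seen r else k :: pvDed (seen ++ [k]) r

theorem pvPend_zero (cfg : List String) (d : PySem.Dict String Int)
    (h0 : ∀ j, d.getD j 0 = 0) :
    ∀ seen, pvPend cfg d seen = (pvDed seen cfg).map (fun k => (k, pvRealKey k)) := by
  induction cfg with
  | nil => intro seen; rfl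
  | cons k r ih =>
    intro seen
    by_cases hk : k ∈ seen
    · simp [pvPend, pvDed, hk, ih]
    · simp [pvPend, pvDed, hk, h0 k, ih]

theorem pvDed_foldl_add (cfg : List String) :
    ∀ (seen : List String), cfg.foldl PySem.Set.add seen = seen ++ pvDed seen cfg := by
  induction cfg with
  | nil => intro seen; simp [pvDed]
  | cons k r ih =>
    intro seen
    rw [List.foldl_cons]
    by_cases hk : k ∈ seen
    · have hc : PySem.Set.contains seen k = true := (PySem.Set.contains_iff seen k).mpr hk
      have hadd : PySem.Set.add seen k = seen := by unfold PySem.Set.add; rw [if_pos hc]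
      rw [hadd, ih seen]
      simp [pvDed, hk]
    · have hc : ¬ PySem.Set.contains seen k = true :=
        fun hx => hk ((PySem.Set.contains_iff seen k).mp hx)
      have hadd : PySem.Set.add seen k = seen ++ [k] := by unfold PySem.Set.add; rw [if_neg hc]
      rw [hadd, ih (seen ++ [k])]
      simp [pvDed, hk]

theorem pvDedup_eq (cfg : List String) : PySem.List.dedup cfg = pvDed [] cfg := by
  have h1 : PySem.List.dedup cfg = PySem.Set.ofList cfg := PySem.List.dedup_eq_ofList cfg
  have h2 : PySem.Set.ofList cfg = cfg.foldl PySem.Set.add PySem.Set.empty := rfl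
  rw [h1, h2]
  have := pvDed_foldl_add cfg []
  simpa [PySem.Set.empty] using this

-- the dict of first-match indices, looked up on its own key list
theorem pvFirstDict (f : String → Int) (keys : List String) :
    ∀ (d : PySem.Dict String Int) (j : String),
    (keys.foldl (fun d k => d.insert k (f k)) d).getD j 0
      = if j ∈ keys then f j else d.getD j 0 := by
  induction keys with
  | nil => intro d j; simp
  | cons k r ih =>
    intro d j
    rw [List.foldl_cons, ih]
    by_cases hr : j ∈ r
    · simp [hr]
    · by_cases hk : j = k
      · subst hk; simp [hr]
      · simp [hr, hk, PySem.Dict.getD_insert]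

theorem pvHit_eq (line rk : String) : pvHit line rk = PySem.Str.isIn rk line := by
  simp only [pvHit, PySem.Str.find_eq, PySem.Str.isIn_eq]
  by_cases h : rk.toList <:+: line.toList
  · have h1 := (PySem.Chars.find_ne_neg_one_iff line.toList rk.toList).mpr h
    have h2 := (PySem.Chars.isIn_iff_infix rk.toList line.toList).mpr h
    simp [h1, h2]
  · have h1 := (PySem.Chars.find_eq_neg_one_iff line.toList rk.toList).mpr h
    have h2 := (PySem.Chars.isIn_eq_false_iff rk.toList line.toList).mpr h
    simp [h1, h2]

theorem pvFirst_lb (rk : String) :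
    ∀ (lines : List String) (i : Int),
    pvFirstFrom rk i lines = -1 ∨ i ≤ pvFirstFrom rk i lines := by
  intro lines
  induction lines with
  | nil => intro i; left; rfl
  | cons l r ih =>
    intro i
    by_cases h : PySem.Chars.isIn rk.toList l.toList = true
    · right; simp [pvFirstFrom, h]
    · rcases ih (i + 1) with hc | hc
      · left; simp [pvFirstFrom, h, hc]
      · right; simp only [pvFirstFrom, PySem.Str.isIn_eq, h]; omega

theorem pvFirst_shift (rk : String) :
    ∀ (lines : List String) (i : Int),
    pvFirstFrom rk i lines
      = if pvFirstFrom rk 0 lines = -1 then -1 else i + pvFirstFrom rk 0 lines := by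
  intro lines
  induction lines with
  | nil => intro i; simp [pvFirstFrom]
  | cons l r ih =>
    intro i
    by_cases h : PySem.Chars.isIn rk.toList l.toList = true
    · simp [pvFirstFrom, h]
    · simp only [pvFirstFrom, PySem.Str.isIn_eq, h, Bool.false_eq_true, if_false, zero_add]
      rw [ih (i + 1), ih 1]
      by_cases hc : pvFirstFrom rk 0 r = -1
      · simp [hc]
      · have : ¬ (1 + pvFirstFrom rk 0 r = -1) := by
          rcases pvFirst_lb rk r 0 with hx | hx
          · exact absurd hx hc
          · omega
        simp only [if_neg hc, if_neg this]
        omega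

theorem pvFirst_zero_iff (rk l : String) (rest : List String) :
    (pvFirstFrom rk 0 (l :: rest) == (0 : Int)) = pvHit l rk := by
  rw [pvHit_eq]
  by_cases h : PySem.Chars.isIn rk.toList l.toList = true
  · simp [pvFirstFrom, h, PySem.Str.isIn_eq]
  · have hne : pvFirstFrom rk 1 rest ≠ 0 := by
      rcases pvFirst_lb rk rest 1 with hx | hx <;> omega
    simp [pvFirstFrom, h, hne, PySem.Str.isIn_eq]

theorem pvFirst_succ_iff (rk l : String) (rest : List String) (i : Nat) :
    (pvFirstFrom rk 0 (l :: rest) == ((i : Int) + 1))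
      = (!pvHit l rk && (pvFirstFrom rk 0 rest == (i : Int))) := by
  rw [pvHit_eq]
  by_cases h : PySem.Chars.isIn rk.toList l.toList = true
  · have : ¬ ((0 : Int) = (i : Int) + 1) := by omega
    simp [pvFirstFrom, h, this, PySem.Str.isIn_eq]
  · simp only [pvFirstFrom, PySem.Str.isIn_eq, h, if_false, Bool.false_eq_true, zero_add,
      Bool.not_false, Bool.true_and]
    rw [pvFirst_shift rk rest 1]
    by_cases hc : pvFirstFrom rk 0 rest = -1
    · have h1 : ¬ ((-1 : Int) = (i : Int) + 1) := by omega
      have h2 : ¬ (pvFirstFrom rk 0 rest = (i : Int)) := by rw [hc]; omega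
      simp [hc, h1]
    · simp only [hc, if_false]
      have : (1 + pvFirstFrom rk 0 rest = (i : Int) + 1) ↔ (pvFirstFrom rk 0 rest = (i : Int)) := by
        omega
      simp [this]

-- the bucket characterisation: scanning lines against a worklist = keys grouped by the
-- index of the first line whose text contains their search string
theorem pvScan_buckets :
    ∀ (lines : List String) (ps : List (String × String)),
    pvScan ps lines = (List.range lines.length).flatMap
      (fun (i : Nat) => (ps.filter (fun p => pvFirstFrom p.2 0 lines == (i : Int))).map Prod.fst) := by
  intro lines
  induction lines with
  | nil => intro ps; cases ps <;> simp [pvScan]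
  | cons l rest ih =>
    intro ps
    by_cases hps : ps = []
    · subst hps
      rw [pvScan_nil]
      simp
    · conv_lhs => rw [show pvScan ps (l :: rest)
        = if ps = [] then []
          else ((ps.filter fun p => pvHit l p.2).map Prod.fst)
            ++ pvScan (ps.filter fun p => !pvHit l p.2) rest from rfl]
      rw [if_neg hps, ih]
      rw [List.length_cons, List.range_succ_eq_map, List.flatMap_cons, List.flatMap_map]
      congr 1
      · congr 1
        refine List.filter_congr (fun p _ => ?_)
        simp only [Nat.cast_zero]
        exact (pvFirst_zero_iff p.2 l rest).symm
      · refine List.flatMap_congr (fun i _ => ?_)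
        congr 1
        rw [List.filter_filter]
        refine List.filter_congr (fun p _ => ?_)
        have := pvFirst_succ_iff p.2 l rest i
        simp only [Nat.cast_succ]
        rw [this]
        simp [Bool.and_comm]

-- ===== VERDICT (by name: the statement is the Claim_ definition above) =====
theorem createStringLineList_spec : Claim_equal_createStringLineList := by
  intro CONFIG lineList _
  show createStringLineList CONFIG lineList = createStringLineList_alt CONFIG lineList
  show ((PySem.List.pyRange 0 (lineList.length : Int) 1).foldl
      (fun st i => CONFIG.foldl (pvStepA (PySem.List.pyGetD lineList i "")) st)
      ([], CONFIG.foldl (fun d key => d.insert key 0) PySem.Dict.empty)).1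
    = createStringLineList_alt CONFIG lineList
  rw [PySem.List.foldl_pyRange_zero_pyGetD' lineList ""
      (fun st line => CONFIG.foldl (pvStepA line) st) _]
  have h0 : ∀ j, (CONFIG.foldl (fun d key => d.insert key 0)
      (PySem.Dict.empty : PySem.Dict String Int)).getD j 0 = 0 :=
    pvChecked0 CONFIG PySem.Dict.empty (by simp [PySem.Dict.getD_empty])
  rw [pvOuter_spec CONFIG lineList []
      (CONFIG.foldl (fun d key => d.insert key 0) PySem.Dict.empty)]
  rw [pvPend_zero CONFIG _ h0 [], pvScan_buckets]
  -- now massage B's side into the same bucket form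
  show _ = (PySem.List.pyRange 0 (lineList.length : Int) 1).flatMap
    (fun i => (PySem.List.dedup CONFIG).filter
      (fun k => ((PySem.List.dedup CONFIG).foldl
          (fun d k => d.insert k (pvFirstFrom (pvRealKey k) 0 lineList))
          PySem.Dict.empty).getD k 0 == i))
  rw [PySem.List.pyRange_zero_natCast, List.flatMap_map, pvDedup_eq]
  simp only [List.nil_append]
  refine List.flatMap_congr (fun i _ => ?_)
  rw [List.filter_map, List.map_map]
  have hpred : ∀ k ∈ pvDed [] CONFIG,
      ((fun p => pvFirstFrom p.2 0 lineList == (i : Int)) ∘ fun k => (k, pvRealKey k)) k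
        = (fun k => ((pvDed [] CONFIG).foldl
            (fun d k => d.insert k (pvFirstFrom (pvRealKey k) 0 lineList))
            PySem.Dict.empty).getD k 0 == (i : Int)) k := by
    intro k hk
    simp only [Function.comp]
    rw [pvFirstDict (fun k => pvFirstFrom (pvRealKey k) 0 lineList) (pvDed [] CONFIG)
      PySem.Dict.empty k]
    simp [hk]
  rw [List.filter_congr hpred,
    show (Prod.fst ∘ fun k => (k, pvRealKey k)) = id from rfl, List.map_id]
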